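-- pv_equiv track=rewrite | github.com/RGnt/marian | server/tts_kokoro.py | replace_fenced_code_blocks
-- ===== SOURCE A (Python) =====
-- def replace_fenced_code_blocks(md: str) -> str:
--     """
--     Replace each fenced code block ```...``` with a single sentence:
--     'Check the code below.'
--     This keeps the displayed markdown intact (frontend), but audio avoids reading code.
--     """
--     out = []
--     i = 0
--     in_code = False
--     while i < len(md):
--         j = md.find("```", i)
--         if j == -1:
--             if not in_code:
--                 out.append(md[i:])
--             # if in_code, discard remainder
--             break
--
--         if not in_code:
--             # keep prose up to fence
--             out.append(md[i:j])
--             # insert placeholder once per block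
--             out.append("\nCheck the code below.\n")
--             in_code = True
--         else:
--             # leaving code: discard code content between fences
--             in_code = False
--
--         i = j + 3
--
--     return "".join(out)
-- ===== SOURCE B (Python) =====
-- def replace_fenced_code_blocks(md: str) -> str:
--     # Split on the fence marker: even segments are prose, odd segments are code.
--     parts = md.split("```")
--     out = [parts[0]]
--     rest = parts[1:]
--     while rest:
--         out.append("\nCheck the code below.\n")
--         if len(rest) >= 2:
--             out.append(rest[1])
--         rest = rest[2:]
--     return "".join(out)
-- ===== Notes on version B (the rewrite author's own statement) =====
-- stated objective: idiomatic
-- what changed: Replaces A's stateful while-loop scanning with md.find('```', i) and an in_code flag by a single md.split('```') followed by a pairwise walk over the segments (odd segments are code, each emits one placeholder).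
import Mathlib
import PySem

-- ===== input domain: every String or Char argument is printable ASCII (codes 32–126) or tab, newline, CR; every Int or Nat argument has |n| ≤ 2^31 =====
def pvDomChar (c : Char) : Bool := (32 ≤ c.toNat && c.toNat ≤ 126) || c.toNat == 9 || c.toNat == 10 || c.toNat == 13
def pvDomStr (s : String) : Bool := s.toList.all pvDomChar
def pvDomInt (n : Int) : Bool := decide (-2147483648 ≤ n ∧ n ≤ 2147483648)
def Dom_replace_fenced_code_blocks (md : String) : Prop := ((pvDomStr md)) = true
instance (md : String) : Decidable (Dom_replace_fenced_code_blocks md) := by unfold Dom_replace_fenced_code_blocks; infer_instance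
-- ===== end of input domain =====

-- B replaces A's stateful find-scan loop by a single split on "```" followed by a
-- pairwise walk over the segments (odd segments are code); objective: more idiomatic.

-- shared string constants of both programs
def pvSep : List Char := ['`', '`', '`']
def pvPH : List Char := "\nCheck the code below.\n".toList

-- ===== PORT A =====
-- A's while-loop: state = remaining suffix of md (i is only used to slice md[i:…]) and the in_code flag.
def pvLoopA (cs : List Char) (in_code : Bool) : List Char :=
  if h : PySem.Chars.find cs pvSep = -1 then
    (if in_code then [] else cs)
  else
    if in_code then
      pvLoopA (cs.drop ((PySem.Chars.find cs pvSep).toNat + 3)) false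
    else
      cs.take (PySem.Chars.find cs pvSep).toNat ++ pvPH ++
        pvLoopA (cs.drop ((PySem.Chars.find cs pvSep).toNat + 3)) true
termination_by cs.length
decreasing_by
  all_goals
    have hinf : pvSep <:+: cs := (PySem.Chars.find_ne_neg_one_iff cs pvSep).mp h
    have hlen : pvSep.length ≤ cs.length := hinf.length_le
    simp only [List.length_drop]
    simp only [pvSep, List.length] at hlen
    omega

def replace_fenced_code_blocks (md : String) : String :=
  String.mk (pvLoopA md.toList false)

-- ===== PORT B =====
-- the while-loop of Source B over rest: one placeholder per odd segment, keep the even segment after it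
def pvGlue : List (List Char) → List Char
  | [] => []
  | [_] => pvPH
  | _ :: p :: rest => pvPH ++ p ++ pvGlue rest

def replace_fenced_code_blocks_alt (md : String) : String :=
  match PySem.Chars.splitOn md.toList pvSep with
  | [] => ""   -- unreachable: str.split never returns an empty list (totality guard only)
  | p0 :: rest => String.mk (p0 ++ pvGlue rest)

-- ===== PRECONDITION & SPEC =====
def Spec_replace_fenced_code_blocks (md : String) (out : String) : Prop := out = replace_fenced_code_blocks_alt md
instance (md : String) (out : String) : Decidable (Spec_replace_fenced_code_blocks md out) := by unfold Spec_replace_fenced_code_blocks; infer_instance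

-- ===== CLAIM (what is proved, stated in full; the proofs are below) =====
def Claim_equal_replace_fenced_code_blocks : Prop := ∀ (md : String), Dom_replace_fenced_code_blocks md → Spec_replace_fenced_code_blocks md (replace_fenced_code_blocks md)

-- ===== LEMMAS AND PROOFS =====

-- the common skeleton both ports are reduced to: split at the leftmost "```", jump past it
def pvMySplit (cs : List Char) : List (List Char) :=
  if h : PySem.Chars.find cs pvSep = -1 then [cs]
  else cs.take (PySem.Chars.find cs pvSep).toNat ::
    pvMySplit (cs.drop ((PySem.Chars.find cs pvSep).toNat + 3))
termination_by cs.length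
decreasing_by
  have hinf : pvSep <:+: cs := (PySem.Chars.find_ne_neg_one_iff cs pvSep).mp h
  have hlen : pvSep.length ≤ cs.length := hinf.length_le
  simp only [List.length_drop]
  simp only [pvSep, List.length] at hlen
  omega

def pvHead : List (List Char) → List Char
  | [] => []
  | p :: rest => p ++ pvGlue rest

def pvAfter : List (List Char) → List Char
  | [] => []
  | [_] => []
  | _ :: p :: rest => p ++ pvGlue rest

lemma pvMySplit_ne_nil (cs : List Char) : pvMySplit cs ≠ [] := by
  rw [pvMySplit]; split <;> simp

lemma pvGlue_eq_after (m : List (List Char)) (h : m ≠ []) :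
    pvGlue m = pvPH ++ pvAfter m := by
  match m with
  | [] => exact absurd rfl h
  | [c] => simp [pvGlue, pvAfter]
  | c :: p :: rest => simp [pvGlue, pvAfter]

-- facts delivered by a successful find
lemma pv_find_facts (cs : List Char) (h : PySem.Chars.find cs pvSep ≠ -1) :
    pvSep <+: cs.drop (PySem.Chars.find cs pvSep).toNat ∧
    (∀ i < (PySem.Chars.find cs pvSep).toNat, ¬ pvSep <+: cs.drop i) ∧
    (PySem.Chars.find cs pvSep).toNat + 3 ≤ cs.length := by
  have h0 : 0 ≤ PySem.Chars.find cs pvSep :=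
    (PySem.Chars.find_nonneg_iff cs pvSep).mpr ((PySem.Chars.find_ne_neg_one_iff cs pvSep).mp h)
  obtain ⟨hpre, hmin⟩ := PySem.Chars.find_spec h0
  refine ⟨hpre, hmin, ?_⟩
  have := hpre.length_le
  simp only [pvSep, List.length, List.length_drop] at this ⊢
  omega

-- splitOn.go walks over j match-free positions one character at a time
lemma pv_go_walk (j : Nat) : ∀ (fuel : Nat) (l cur : List Char) (acc : List (List Char)),
    j ≤ l.length → (∀ i < j, ¬ pvSep <+: l.drop i) →
    PySem.Chars.splitOn.go pvSep (fuel + j) l cur acc =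
      PySem.Chars.splitOn.go pvSep fuel (l.drop j) ((l.take j).reverse ++ cur) acc := by
  induction j with
  | zero => intro fuel l cur acc _ _; simp
  | succ j ih =>
    intro fuel l cur acc hle hno
    match l with
    | [] => simp at hle
    | c :: rest =>
      have hnp : pvSep.isPrefixOf (c :: rest) = false := by
        by_contra hcon
        exact hno 0 (Nat.succ_pos j)
          (by simpa [List.isPrefixOf_iff_prefix] using
            (Bool.not_eq_false _).mp hcon)
      have step : PySem.Chars.splitOn.go pvSep ((fuel + j) + 1) (c :: rest) cur acc =
          PySem.Chars.splitOn.go pvSep (fuel + j) rest (c :: cur) acc := by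
        rw [PySem.Chars.splitOn.go]; simp [hnp]
      have harr : fuel + (j + 1) = (fuel + j) + 1 := by omega
      rw [harr, step, ih fuel rest (c :: cur) acc (by simpa using hle)
        (fun i hi => by simpa using hno (i + 1) (by omega))]
      simp

lemma pv_go_nil (fuel : Nat) (cur : List Char) (acc : List (List Char)) :
    PySem.Chars.splitOn.go pvSep (fuel + 1) [] cur acc = (cur.reverse :: acc).reverse := by
  rw [PySem.Chars.splitOn.go]; simp

lemma pv_go_match (fuel : Nat) (c : Char) (rest cur : List Char) (acc : List (List Char))
    (h : pvSep.isPrefixOf (c :: rest) = true) :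
    PySem.Chars.splitOn.go pvSep (fuel + 1) (c :: rest) cur acc =
      PySem.Chars.splitOn.go pvSep fuel (List.drop pvSep.length (c :: rest)) [] (cur.reverse :: acc) := by
  rw [PySem.Chars.splitOn.go]; simp [h]

lemma pv_go_eq_mySplit : ∀ (n : Nat) (cs : List Char) (acc : List (List Char)) (fuel : Nat),
    cs.length ≤ n → cs.length < fuel →
    PySem.Chars.splitOn.go pvSep fuel cs [] acc = acc.reverse ++ pvMySplit cs := by
  intro n
  induction n with
  | zero =>
    intro cs acc fuel hn hf
    have hcs : cs = [] := by
      cases cs with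
      | nil => rfl
      | cons c t => simp at hn
    subst hcs
    obtain ⟨m, rfl⟩ : ∃ m, fuel = m + 1 := ⟨fuel - 1, by omega⟩
    rw [pv_go_nil]
    rw [pvMySplit]
    have : PySem.Chars.find ([] : List Char) pvSep = -1 := by decide
    simp [this]
  | succ n ih =>
    intro cs acc fuel hn hf
    by_cases h : PySem.Chars.find cs pvSep = -1
    · -- no fence anywhere: walk over all of cs, then close out
      have hno : ∀ i < cs.length, ¬ pvSep <+: cs.drop i := by
        intro i _ hpre
        have : PySem.Chars.isIn pvSep cs = true :=
          (PySem.Chars.exists_prefix_drop_iff_isIn pvSep cs).mp ⟨i, hpre⟩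
        have : pvSep <:+: cs := (PySem.Chars.isIn_iff_infix pvSep cs).mp this
        exact ((PySem.Chars.find_eq_neg_one_iff cs pvSep).mp h) this
      obtain ⟨m, hm⟩ : ∃ m, fuel = (m + 1) + cs.length := ⟨fuel - cs.length - 1, by omega⟩
      rw [hm, pv_go_walk cs.length (m + 1) cs [] acc (le_refl _) hno]
      simp only [List.drop_length, List.take_length, List.append_nil]
      rw [pv_go_nil]
      rw [pvMySplit]
      simp [h]
    · obtain ⟨hpre, hmin, hlen⟩ := pv_find_facts cs h
      set jn := (PySem.Chars.find cs pvSep).toNat with hjn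
      obtain ⟨m, hm⟩ : ∃ m, fuel = (m + 1) + jn := ⟨fuel - jn - 1, by omega⟩
      rw [hm, pv_go_walk jn (m + 1) cs [] acc (by omega) hmin]
      obtain ⟨c, rest, hdrop⟩ : ∃ c rest, cs.drop jn = c :: rest := by
        cases hd : cs.drop jn with
        | nil => rw [hd] at hpre; simp [pvSep] at hpre
        | cons c rest => exact ⟨c, rest, rfl⟩
      have hp : pvSep.isPrefixOf (c :: rest) = true := by
        rw [List.isPrefixOf_iff_prefix]; rw [hdrop] at hpre; exact hpre
      rw [hdrop, pv_go_match m c rest _ acc hp]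
      rw [← hdrop, List.drop_drop]
      have hlen3 : (cs.drop (jn + pvSep.length)).length ≤ n := by
        simp only [List.length_drop, pvSep, List.length]
        omega
      have hfuel3 : (cs.drop (jn + pvSep.length)).length < m := by
        simp only [List.length_drop, pvSep, List.length]
        omega
      rw [ih (cs.drop (jn + pvSep.length)) _ m hlen3 hfuel3]
      have hsep3 : jn + pvSep.length = jn + 3 := by simp [pvSep]
      have hout : pvMySplit cs = List.take jn cs :: pvMySplit (List.drop (jn + 3) cs) := by
        conv_lhs => rw [pvMySplit]
        simp [h, ← hjn]
      rw [hsep3, hout]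
      simp

lemma pv_splitOn_eq (cs : List Char) : PySem.Chars.splitOn cs pvSep = pvMySplit cs := by
  rw [PySem.Chars.splitOn]
  simpa using pv_go_eq_mySplit cs.length cs [] (cs.length + 1) (le_refl _) (by omega)

lemma pv_loopA_eq : ∀ (n : Nat) (cs : List Char), cs.length ≤ n →
    pvLoopA cs false = pvHead (pvMySplit cs) ∧ pvLoopA cs true = pvAfter (pvMySplit cs) := by
  intro n
  induction n with
  | zero =>
    intro cs hn
    have hcs : cs = [] := by
      cases cs with
      | nil => rfl
      | cons c t => simp at hn
    subst hcs
    have h : PySem.Chars.find ([] : List Char) pvSep = -1 := by decide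
    constructor
    · rw [pvLoopA, pvMySplit]; simp [h, pvHead, pvGlue]
    · rw [pvLoopA, pvMySplit]; simp [h, pvAfter]
  | succ n ih =>
    intro cs hn
    by_cases h : PySem.Chars.find cs pvSep = -1
    · constructor
      · rw [pvLoopA, pvMySplit]; simp [h, pvHead, pvGlue]
      · rw [pvLoopA, pvMySplit]; simp [h, pvAfter]
    · obtain ⟨hpre, hmin, hlen⟩ := pv_find_facts cs h
      set jn := (PySem.Chars.find cs pvSep).toNat with hjn
      have hrec : (cs.drop (jn + 3)).length ≤ n := by
        simp only [List.length_drop]; omega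
      obtain ⟨ihf, iht⟩ := ih (cs.drop (jn + 3)) hrec
      have hne := pvMySplit_ne_nil (cs.drop (jn + 3))
      constructor
      · rw [pvLoopA, pvMySplit]
        simp only [h, dite_false, if_false, Bool.false_eq_true, ← hjn]
        rw [iht, pvHead, pvGlue_eq_after _ hne]
        simp
      · rw [pvLoopA, pvMySplit]
        simp only [h, dite_false, if_true, ← hjn]
        rw [ihf]
        cases hm : pvMySplit (cs.drop (jn + 3)) with
        | nil => exact absurd hm hne
        | cons p rest => simp [pvAfter, pvHead]

-- ===== VERDICT (by name: the statement is the Claim_ definition above) =====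
theorem replace_fenced_code_blocks_spec : Claim_equal_replace_fenced_code_blocks := by
  intro md _
  unfold Spec_replace_fenced_code_blocks replace_fenced_code_blocks replace_fenced_code_blocks_alt
  rw [pv_splitOn_eq, (pv_loopA_eq md.toList.length md.toList (le_refl _)).1]
  cases hm : pvMySplit md.toList with
  | nil => exact absurd hm (pvMySplit_ne_nil _)
  | cons p rest => simp [pvHead]
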